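-- pv_equiv track=rewrite | github.com/paw309/Old-Hamiltonian-Knights | archive/knight_square_to_square.py | num_knight_paths
-- ===== SOURCE A (Python) =====
-- from collections import deque
--
-- def is_valid(r, c, n):
--     """Check if the position is valid on an n x n board."""
--     return 0 <= r < n and 0 <= c < n
--
-- def knight_moves():
--     """All possible knight moves."""
--     return [
--         (2, 1), (1, 2), (-1, 2), (-2, 1),
--         (-2, -1), (-1, -2), (1, -2), (2, -1)
--     ]
--
-- def num_knight_paths(n, start, end):
--     """Calculate number of shortest paths for a knight from start to end on an n x n board."""
--     queue = deque()
--     queue.append((start[0], start[1]))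
--     visited = [[-1 for _ in range(n)] for _ in range(n)]
--     paths = [[0 for _ in range(n)] for _ in range(n)]
--
--     visited[start[0]][start[1]] = 0
--     paths[start[0]][start[1]] = 1
--
--     while queue:
--         r, c = queue.popleft()
--         for dr, dc in knight_moves():
--             nr, nc = r + dr, c + dc
--             if is_valid(nr, nc, n):
--                 if visited[nr][nc] == -1:
--                     visited[nr][nc] = visited[r][c] + 1
--                     paths[nr][nc] = paths[r][c]
--                     queue.append((nr, nc))
--                 elif visited[nr][nc] == visited[r][c] + 1:
--                     paths[nr][nc] += paths[r][c]
--     return visited[end[0]][end[1]], paths[end[0]][end[1]]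
-- ===== SOURCE B (Python) =====
-- def num_knight_paths(n, start, end):
--     """Two-pass re-implementation: a discovery pass fills only the distance grid and
--     records the visit order; a second replay pass over that order accumulates the
--     shortest-path counts from the finished distance grid."""
--     moves = [(2, 1), (1, 2), (-1, 2), (-2, 1),
--              (-2, -1), (-1, -2), (1, -2), (2, -1)]
--     visited = [[-1] * n for _ in range(n)]
--     visited[start[0]][start[1]] = 0
--     order = [(start[0], start[1])]
--     i = 0
--     while i < len(order):
--         r, c = order[i]
--         i += 1
--         for dr, dc in moves:
--             nr, nc = r + dr, c + dc
--             if 0 <= nr < n and 0 <= nc < n and visited[nr][nc] == -1: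
--                 visited[nr][nc] = visited[r][c] + 1
--                 order.append((nr, nc))
--     paths = [[0] * n for _ in range(n)]
--     paths[start[0]][start[1]] = 1
--     for r, c in order:
--         for dr, dc in moves:
--             nr, nc = r + dr, c + dc
--             if 0 <= nr < n and 0 <= nc < n and visited[nr][nc] == visited[r][c] + 1:
--                 paths[nr][nc] += paths[r][c]
--     return visited[end[0]][end[1]], paths[end[0]][end[1]]
-- ===== Notes on version B (the rewrite author's own statement) =====
-- stated objective: alternative
-- what changed: A's single queue loop that interleaves distance assignment with path-count accumulation is replaced by two passes: a discovery pass that fills only the distance grid and records the visit order, then a replay pass over that order that accumulates shortest-path counts from the finished distance grid.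
import Mathlib
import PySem

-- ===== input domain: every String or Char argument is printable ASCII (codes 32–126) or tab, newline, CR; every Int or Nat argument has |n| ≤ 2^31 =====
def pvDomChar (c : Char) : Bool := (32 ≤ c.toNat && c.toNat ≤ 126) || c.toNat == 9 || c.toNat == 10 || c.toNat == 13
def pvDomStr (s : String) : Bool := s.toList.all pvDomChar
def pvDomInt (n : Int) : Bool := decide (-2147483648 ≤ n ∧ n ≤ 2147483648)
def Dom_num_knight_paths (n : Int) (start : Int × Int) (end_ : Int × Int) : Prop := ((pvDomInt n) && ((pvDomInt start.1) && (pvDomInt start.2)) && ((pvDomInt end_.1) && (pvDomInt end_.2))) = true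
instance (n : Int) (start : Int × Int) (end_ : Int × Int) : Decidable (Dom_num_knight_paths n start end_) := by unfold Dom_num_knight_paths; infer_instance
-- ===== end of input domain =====

-- B replaces A's single queue loop (distances and path counts interleaved) by two passes:
-- a discovery pass that fills only the distance grid and records the visit order, then a
-- replay pass over that order that accumulates the path counts from the finished distances.
-- Objective: alternative decomposition (same asymptotic cost); return value only, no mutation.

-- ===== shared low-level helpers (Python grid/indexing semantics, used by both ports) =====
-- knight_moves() of the Python module
def knightMoves : List (Int × Int) :=
  [(2, 1), (1, 2), (-1, 2), (-2, 1), (-2, -1), (-1, -2), (1, -2), (2, -1)]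

-- is_valid(r, c, n) of the Python module
abbrev isValid (r c n : Int) : Prop := 0 ≤ r ∧ r < n ∧ 0 ≤ c ∧ c < n

-- [[v]*n for _ in range(n)]
def mkGrid (n : Int) (v : Int) : List (List Int) :=
  List.replicate n.toNat (List.replicate n.toNat v)

-- g[r] (Python indexing, negative wraps); default [] only where Python raises (outside Pre_)
def getRow (g : List (List Int)) (r : Int) : List Int :=
  (PySem.List.pyGet? g r).getD []

-- g[r][c] (Python indexing); default 0 only where Python raises (outside Pre_)
def getCell (g : List (List Int)) (r c : Int) : Int :=
  (PySem.List.pyGet? (getRow g r) c).getD 0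

-- g[r][c] = v (Python assignment, negative wraps); no-op only where Python raises (outside Pre_)
def setCell (g : List (List Int)) (r c v : Int) : List (List Int) :=
  PySem.List.pySetD g r (PySem.List.pySetD (getRow g r) c v)

-- ===== PORT A =====
-- body of A's `for dr, dc in knight_moves():`  (state: queue × visited × paths)
def aStep (n r c : Int)
    (acc : List (Int × Int) × List (List Int) × List (List Int)) (m : Int × Int) :
    List (Int × Int) × List (List Int) × List (List Int) :=
  let nr := r + m.1
  let nc := c + m.2
  if isValid nr nc n then
    if getCell acc.2.1 nr nc = -1 then
      (acc.1 ++ [(nr, nc)],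
       setCell acc.2.1 nr nc (getCell acc.2.1 r c + 1),
       setCell acc.2.2 nr nc (getCell acc.2.2 r c))
    else if getCell acc.2.1 nr nc = getCell acc.2.1 r c + 1 then
      (acc.1, acc.2.1, setCell acc.2.2 nr nc (getCell acc.2.2 nr nc + getCell acc.2.2 r c))
    else acc
  else acc

-- A's `while queue:` loop: one pop (or nothing when the queue is empty) per fuel unit;
-- fuel n²+1 bounds the pops (each pop consumes one enqueue, and there are at most n²
-- enqueues, one per cell ever discovered), so the queue is always drained
def aPop (n : Int) (st : List (Int × Int) × List (List Int) × List (List Int)) :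
    List (Int × Int) × List (List Int) × List (List Int) :=
  match st.1 with
  | [] => st
  | y :: q => knightMoves.foldl (aStep n y.1 y.2) (q, st.2.1, st.2.2)

def aLoop (n : Int) (fuel : Nat) (q : List (Int × Int)) (V P : List (List Int)) :
    List (List Int) × List (List Int) :=
  let fin := (List.replicate fuel ()).foldl (fun st _ => aPop n st) (q, V, P)
  (fin.2.1, fin.2.2)

def num_knight_paths (n : Int) (start : Int × Int) (end_ : Int × Int) : Int × Int :=
  let V := setCell (mkGrid n (-1)) start.1 start.2 0
  let P := setCell (mkGrid n 0) start.1 start.2 1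
  let res := aLoop n (n.toNat * n.toNat + 1) [(start.1, start.2)] V P
  (getCell res.1 end_.1 end_.2, getCell res.2 end_.1 end_.2)

-- ===== PORT B =====
-- body of B's discovery-pass inner loop (state: pending order suffix × visited)
def bStep (n r c : Int)
    (acc : List (Int × Int) × List (List Int)) (m : Int × Int) :
    List (Int × Int) × List (List Int) :=
  let nr := r + m.1
  let nc := c + m.2
  if isValid nr nc n ∧ getCell acc.2 nr nc = -1 then
    (acc.1 ++ [(nr, nc)], setCell acc.2 nr nc (getCell acc.2 r c + 1))
  else acc

-- B's `while i < len(order):` scan: the scanned prefix is the `done` component, the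
-- pending suffix order[i:] is the queue component; same fuel bound as A's loop
def bPop (n : Int) (st : List (Int × Int) × List (List Int) × List (Int × Int)) :
    List (Int × Int) × List (List Int) × List (Int × Int) :=
  match st.1 with
  | [] => st
  | y :: td =>
    let s := knightMoves.foldl (bStep n y.1 y.2) (td, st.2.1)
    (s.1, s.2, st.2.2 ++ [y])

-- returns the processed visit order and the finished distance grid
def bPass1 (n : Int) (fuel : Nat) (q : List (Int × Int)) (V : List (List Int)) :
    List (Int × Int) × List (List Int) :=
  let fin := (List.replicate fuel ()).foldl (fun st _ => bPop n st) (q, V, [])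
  (fin.2.2, fin.2.1)

-- body of B's replay-pass inner loop (reads the finished distance grid Vf only)
def b2Step (n : Int) (Vf : List (List Int)) (r c : Int)
    (P : List (List Int)) (m : Int × Int) : List (List Int) :=
  let nr := r + m.1
  let nc := c + m.2
  if isValid nr nc n ∧ getCell Vf nr nc = getCell Vf r c + 1 then
    setCell P nr nc (getCell P nr nc + getCell P r c)
  else P

-- B's `for r, c in order:` replay pass
def bPass2 (n : Int) (Vf : List (List Int)) (ord : List (Int × Int))
    (P : List (List Int)) : List (List Int) :=
  ord.foldl (fun Pa y => knightMoves.foldl (b2Step n Vf y.1 y.2) Pa) P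

def num_knight_paths_alt (n : Int) (start : Int × Int) (end_ : Int × Int) : Int × Int :=
  let V0 := setCell (mkGrid n (-1)) start.1 start.2 0
  let d := bPass1 n (n.toNat * n.toNat + 1) [(start.1, start.2)] V0
  let P := bPass2 n d.2 d.1 (setCell (mkGrid n 0) start.1 start.2 1)
  (getCell d.2 end_.1 end_.2, getCell P end_.1 end_.2)

-- ===== PRECONDITION & SPEC =====
-- Pre_ is exactly where the Python A returns: n ≥ 1 and every start/end coordinate a valid
-- Python index into the n×n grids (−n ≤ i < n); outside it A raises IndexError.
def Pre_num_knight_paths (n : Int) (start : Int × Int) (end_ : Int × Int) : Prop :=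
  1 ≤ n ∧ -n ≤ start.1 ∧ start.1 < n ∧ -n ≤ start.2 ∧ start.2 < n ∧
    -n ≤ end_.1 ∧ end_.1 < n ∧ -n ≤ end_.2 ∧ end_.2 < n
instance (n : Int) (start : Int × Int) (end_ : Int × Int) :
    Decidable (Pre_num_knight_paths n start end_) := by unfold Pre_num_knight_paths; infer_instance

def pvWitness_num_knight_paths : Int × (Int × Int) × (Int × Int) := (5, (0, 0), (4, 4))

def Spec_num_knight_paths (n : Int) (start : Int × Int) (end_ : Int × Int) (out : Int × Int) : Prop := out = num_knight_paths_alt n start end_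
instance (n : Int) (start : Int × Int) (end_ : Int × Int) (out : Int × Int) : Decidable (Spec_num_knight_paths n start end_ out) := by unfold Spec_num_knight_paths; infer_instance

-- ===== CLAIM (what is proved, stated in full; the proofs are below) =====
def Claim_equal_num_knight_paths : Prop := ∀ (n : Int) (start : Int × Int) (end_ : Int × Int), Dom_num_knight_paths n start end_ → Pre_num_knight_paths n start end_ → Spec_num_knight_paths n start end_ (num_knight_paths n start end_)

-- ===== LEMMAS AND PROOFS =====

-- recursive renderings of the two fueled loops (proof-side helpers)
def aLoopR (n : Int) :
    Nat → List (Int × Int) → List (List Int) → List (List Int) → List (List Int) × List (List Int)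
  | 0, _, V, P => (V, P)
  | _ + 1, [], V, P => (V, P)
  | f + 1, y :: q, V, P =>
    let s := knightMoves.foldl (aStep n y.1 y.2) (q, V, P)
    aLoopR n f s.1 s.2.1 s.2.2

def bPass1R (n : Int) :
    Nat → List (Int × Int) → List (List Int) → List (Int × Int) × List (List Int)
  | 0, _, V => ([], V)
  | _ + 1, [], V => ([], V)
  | f + 1, y :: td, V =>
    let s := knightMoves.foldl (bStep n y.1 y.2) (td, V)
    let rest := bPass1R n f s.1 s.2
    (y :: rest.1, rest.2)

lemma aPop_nil (n : Int) (V P : List (List Int)) :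
    ∀ f : Nat, (List.replicate f ()).foldl (fun st _ => aPop n st)
      (([] : List (Int × Int)), V, P) = ([], V, P) := by
  intro f
  induction f with
  | zero => rfl
  | succ f ih => rw [List.replicate_succ, List.foldl_cons]; exact ih

lemma aLoop_eq (n : Int) : ∀ (f : Nat) (q : List (Int × Int)) (V P : List (List Int)),
    aLoop n f q V P = aLoopR n f q V P := by
  intro f
  induction f with
  | zero => intro q V P; rfl
  | succ f ih =>
    intro q V P
    cases q with
    | nil =>
      show ((List.replicate (f + 1) ()).foldl (fun st _ => aPop n st)
        (([] : List (Int × Int)), V, P)).2 = _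
      rw [aPop_nil n V P (f + 1)]
      rfl
    | cons y td =>
      have : aLoop n (f + 1) (y :: td) V P =
          aLoop n f (knightMoves.foldl (aStep n y.1 y.2) (td, V, P)).1
            (knightMoves.foldl (aStep n y.1 y.2) (td, V, P)).2.1
            (knightMoves.foldl (aStep n y.1 y.2) (td, V, P)).2.2 := by
        show ((List.replicate (f + 1) ()).foldl (fun st _ => aPop n st) (y :: td, V, P)).2 = _
        rw [List.replicate_succ, List.foldl_cons]
        rfl
      rw [this, ih]
      rfl

lemma bPop_nil (n : Int) (V : List (List Int)) (done : List (Int × Int)) :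
    ∀ f : Nat, (List.replicate f ()).foldl (fun st _ => bPop n st)
      (([] : List (Int × Int)), V, done) = ([], V, done) := by
  intro f
  induction f with
  | zero => rfl
  | succ f ih => rw [List.replicate_succ, List.foldl_cons]; exact ih

lemma bPass1_fold (n : Int) : ∀ (f : Nat) (q : List (Int × Int)) (V : List (List Int))
    (done : List (Int × Int)),
    ((List.replicate f ()).foldl (fun st _ => bPop n st) (q, V, done)).2.1 =
      (bPass1R n f q V).2 ∧
    ((List.replicate f ()).foldl (fun st _ => bPop n st) (q, V, done)).2.2 =
      done ++ (bPass1R n f q V).1 := by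
  intro f
  induction f with
  | zero => intro q V done; exact ⟨rfl, by simp [bPass1R]⟩
  | succ f ih =>
    intro q V done
    cases q with
    | nil =>
      rw [bPop_nil n V done (f + 1)]
      exact ⟨rfl, by simp [bPass1R]⟩
    | cons y td =>
      rw [List.replicate_succ, List.foldl_cons]
      have hstep : bPop n (y :: td, V, done) =
          ((knightMoves.foldl (bStep n y.1 y.2) (td, V)).1,
           (knightMoves.foldl (bStep n y.1 y.2) (td, V)).2, done ++ [y]) := rfl
      rw [hstep]
      obtain ⟨h1, h2⟩ := ih (knightMoves.foldl (bStep n y.1 y.2) (td, V)).1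
        (knightMoves.foldl (bStep n y.1 y.2) (td, V)).2 (done ++ [y])
      refine ⟨by rw [h1]; rfl, by rw [h2]; simp [bPass1R]⟩

lemma bPass1_eq (n : Int) (f : Nat) (q : List (Int × Int)) (V : List (List Int)) :
    bPass1 n f q V = bPass1R n f q V := by
  obtain ⟨h1, h2⟩ := bPass1_fold n f q V []
  show (((List.replicate f ()).foldl (fun st _ => bPop n st) (q, V, [])).2.2,
    ((List.replicate f ()).foldl (fun st _ => bPop n st) (q, V, [])).2.1) = _
  rw [h1, h2, List.nil_append]


-- normalized (wrapped) position of a Python index i into a list of length N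
def idxN (N : Nat) (i : Int) : Nat := if 0 ≤ i then i.toNat else N - (-i).toNat

-- i is a valid Python index for length n
def inR (n i : Int) : Prop := -n ≤ i ∧ i < n

-- well-formed n×n grid
def WFg (n : Int) (g : List (List Int)) : Prop :=
  g.length = n.toNat ∧ ∀ row ∈ g, row.length = n.toNat

-- V' extends V: every already-set (≠ -1) cell keeps its value
def ExtG (V V' : List (List Int)) : Prop :=
  ∀ a b : Int, getCell V a b ≠ -1 → getCell V' a b = getCell V a b

-- every queued cell has valid indices and is already marked in V
def QInv (n : Int) (q : List (Int × Int)) (V : List (List Int)) : Prop :=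
  ∀ y ∈ q, inR n y.1 ∧ inR n y.2 ∧ getCell V y.1 y.2 ≠ -1

-- unmarked cells carry path count 0
def PInv (V P : List (List Int)) : Prop :=
  ∀ a b : Int, getCell V a b = -1 → getCell P a b = 0

-- all stored distances are ≥ -1
def VInv (V : List (List Int)) : Prop := ∀ a b : Int, -1 ≤ getCell V a b

lemma pyIdx?_inR {n i : Int} (h : inR n i) :
    PySem.List.pyIdx? n.toNat i = some (idxN n.toNat i) := by
  obtain ⟨h1, h2⟩ := h
  simp only [PySem.List.pyIdx?, idxN]; split_ifs <;> simp_all <;> omega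

lemma pyIdx?_oob {n i : Int} (hn : 0 ≤ n) (h : ¬ inR n i) :
    PySem.List.pyIdx? n.toNat i = none := by
  simp only [PySem.List.pyIdx?, inR, not_and_or, not_le, not_lt] at *
  split_ifs <;> simp_all <;> omega

lemma idxN_lt {n i : Int} (h : inR n i) : idxN n.toNat i < n.toNat := by
  obtain ⟨h1, h2⟩ := h; simp only [idxN]; split_ifs <;> omega

lemma getD_set {α : Type} [Inhabited α] (l : List α) (k m : Nat) (v d : α) (hm : m < l.length) :
    (l.set k v).getD m d = if m = k then v else l.getD m d := by
  rw [List.getD_eq_getElem _ d (by simpa using hm), List.getD_eq_getElem _ d hm]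
  rw [List.getElem_set]
  split_ifs <;> first | rfl | omega

lemma getRow_eq {n : Int} {g : List (List Int)} (hW : WFg n g) {a : Int} (ha : inR n a) :
    getRow g a = g.getD (idxN n.toNat a) [] := by
  have hlt : idxN n.toNat a < g.length := by rw [hW.1]; exact idxN_lt ha
  simp only [getRow, PySem.List.pyGet?, hW.1, pyIdx?_inR ha, Option.bind_some]
  rw [List.getElem?_eq_getElem hlt, List.getD_eq_getElem _ _ hlt]
  rfl

lemma rowlen {n : Int} {g : List (List Int)} (hW : WFg n g) {a : Int} (ha : inR n a) :
    (g.getD (idxN n.toNat a) []).length = n.toNat := by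
  have hlt : idxN n.toNat a < g.length := by rw [hW.1]; exact idxN_lt ha
  rw [List.getD_eq_getElem _ _ hlt]
  exact hW.2 _ (List.getElem_mem hlt)

lemma getCell_eq {n : Int} {g : List (List Int)} (hW : WFg n g) {a b : Int}
    (ha : inR n a) (hb : inR n b) :
    getCell g a b = (g.getD (idxN n.toNat a) []).getD (idxN n.toNat b) 0 := by
  have hlen := rowlen hW ha
  have hlt : idxN n.toNat b < (g.getD (idxN n.toNat a) []).length := by
    rw [hlen]; exact idxN_lt hb
  simp only [getCell, getRow_eq hW ha, PySem.List.pyGet?, hlen, pyIdx?_inR hb, Option.bind_some]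
  rw [List.getElem?_eq_getElem hlt, List.getD_eq_getElem _ _ hlt]
  rfl

lemma setCell_eq {n : Int} {g : List (List Int)} (hW : WFg n g) {a b : Int} (v : Int)
    (ha : inR n a) (hb : inR n b) :
    setCell g a b v =
      g.set (idxN n.toNat a) ((g.getD (idxN n.toNat a) []).set (idxN n.toNat b) v) := by
  have hlen := rowlen hW ha
  simp only [setCell, getRow_eq hW ha, PySem.List.pySetD, PySem.List.pySet?, hW.1, hlen,
    pyIdx?_inR ha, pyIdx?_inR hb, Option.map_some, Option.getD_some]

lemma WFg_setCell {n : Int} {g : List (List Int)} (hW : WFg n g) {a b : Int} (v : Int)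
    (ha : inR n a) (hb : inR n b) : WFg n (setCell g a b v) := by
  rw [setCell_eq hW v ha hb]
  refine ⟨by simpa using hW.1, ?_⟩
  intro row hrow
  rcases List.mem_or_eq_of_mem_set hrow with h | h
  · exact hW.2 _ h
  · rw [h]; simpa using rowlen hW ha

lemma getCell_setCell {n : Int} {g : List (List Int)} (hW : WFg n g) {x y a b : Int} (v : Int)
    (hx : inR n x) (hy : inR n y) (ha : inR n a) (hb : inR n b) :
    getCell (setCell g x y v) a b =
      if idxN n.toNat a = idxN n.toNat x ∧ idxN n.toNat b = idxN n.toNat y then v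
      else getCell g a b := by
  have hW' := WFg_setCell hW v hx hy
  rw [getCell_eq hW' ha hb, getCell_eq hW ha hb, setCell_eq hW v hx hy]
  have hga : idxN n.toNat a < g.length := by rw [hW.1]; exact idxN_lt ha
  rw [getD_set _ _ _ _ _ (by simpa using hga)]
  by_cases hax : idxN n.toNat a = idxN n.toNat x
  · simp only [hax, if_true, true_and]
    rw [getD_set _ _ _ _ _ (by rw [rowlen hW hx]; exact idxN_lt hb)]
  · simp [hax]

lemma getCell_oob {n : Int} {g : List (List Int)} (hW : WFg n g) (hn : 0 ≤ n) {a b : Int}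
    (h : ¬ (inR n a ∧ inR n b)) : getCell g a b = 0 := by
  by_cases ha : inR n a
  · have hb : ¬ inR n b := fun hb => h ⟨ha, hb⟩
    simp only [getCell, getRow_eq hW ha, PySem.List.pyGet?, rowlen hW ha, pyIdx?_oob hn hb,
      Option.bind_none, Option.getD_none]
  · simp only [getCell, getRow, PySem.List.pyGet?, hW.1, pyIdx?_oob hn ha, Option.bind_none,
      Option.getD_none]
    have : PySem.List.pyIdx? ([] : List Int).length b = none := by
      simp only [List.length_nil, PySem.List.pyIdx?]
      split_ifs <;> simp_all <;> omega
    simp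

lemma getCell_congr {n : Int} {g : List (List Int)} (hW : WFg n g) {a b a' b' : Int}
    (ha : inR n a) (hb : inR n b) (ha' : inR n a') (hb' : inR n b')
    (h1 : idxN n.toNat a = idxN n.toNat a') (h2 : idxN n.toNat b = idxN n.toNat b') :
    getCell g a b = getCell g a' b' := by
  rw [getCell_eq hW ha hb, getCell_eq hW ha' hb', h1, h2]

lemma WFg_mkGrid (n v : Int) : WFg n (mkGrid n v) := by
  refine ⟨by simp [mkGrid], ?_⟩
  intro row hrow
  rw [List.eq_of_mem_replicate hrow]
  simp

lemma getCell_mkGrid {n : Int} {a b : Int} (v : Int) (ha : inR n a) (hb : inR n b) :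
    getCell (mkGrid n v) a b = v := by
  rw [getCell_eq (WFg_mkGrid n v) ha hb]
  rw [mkGrid, List.getD_eq_getElem _ _
    (show idxN n.toNat a < (List.replicate n.toNat (List.replicate n.toNat v)).length by
      rw [List.length_replicate]; exact idxN_lt ha)]
  simp only [List.getElem_replicate]
  rw [List.getD_eq_getElem _ _
    (show idxN n.toNat b < (List.replicate n.toNat v).length by
      rw [List.length_replicate]; exact idxN_lt hb)]
  simp

lemma ExtG_refl (V : List (List Int)) : ExtG V V := fun _ _ _ => rfl

lemma ExtG_trans {V1 V2 V3 : List (List Int)} (h1 : ExtG V1 V2) (h2 : ExtG V2 V3) :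
    ExtG V1 V3 := by
  intro a b h
  rw [h2 a b (by rw [h1 a b h]; exact h), h1 a b h]

set_option maxHeartbeats 2000000 in
lemma no_alias {n r c : Int} {m : Int × Int} (hm : m ∈ knightMoves)
    (hr : inR n r) (hc : inR n c)
    (h1 : 0 ≤ r + m.1) (h2 : r + m.1 < n) (h3 : 0 ≤ c + m.2) (h4 : c + m.2 < n) :
    ¬ (idxN n.toNat (r + m.1) = idxN n.toNat r ∧ idxN n.toNat (c + m.2) = idxN n.toNat c) := by
  obtain ⟨hr1, hr2⟩ := hr
  obtain ⟨hc1, hc2⟩ := hc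
  fin_cases hm <;> (simp only [idxN] at *; split_ifs at * <;> omega)

-- preservation of all invariants along one aStep, plus the bStep correspondence
set_option maxHeartbeats 3000000 in
lemma aStep_pres {n r c : Int} {q : List (Int × Int)} {V P : List (List Int)} {m : Int × Int}
    (hn : 1 ≤ n)
    (hm : m ∈ knightMoves) (hr : inR n r) (hc : inR n c) (hy : getCell V r c ≠ -1)
    (hWV : WFg n V) (hWP : WFg n P) (hq : QInv n q V) (hI2 : PInv V P) (hI3 : VInv V) :
    (aStep n r c (q, V, P) m).1 = (bStep n r c (q, V) m).1 ∧
    (aStep n r c (q, V, P) m).2.1 = (bStep n r c (q, V) m).2 ∧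
    WFg n (aStep n r c (q, V, P) m).2.1 ∧ WFg n (aStep n r c (q, V, P) m).2.2 ∧
    QInv n (aStep n r c (q, V, P) m).1 (aStep n r c (q, V, P) m).2.1 ∧
    PInv (aStep n r c (q, V, P) m).2.1 (aStep n r c (q, V, P) m).2.2 ∧
    VInv (aStep n r c (q, V, P) m).2.1 ∧
    ExtG V (aStep n r c (q, V, P) m).2.1 ∧
    getCell (aStep n r c (q, V, P) m).2.1 r c = getCell V r c := by
  by_cases hv : isValid (r + m.1) (c + m.2) n
  · have hnr : inR n (r + m.1) := ⟨by omega, hv.2.1⟩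
    have hnc : inR n (c + m.2) := ⟨by omega, hv.2.2.2⟩
    have hal := no_alias hm hr hc hv.1 hv.2.1 hv.2.2.1 hv.2.2.2
    by_cases h1 : getCell V (r + m.1) (c + m.2) = -1
    · -- discovery
      have hstep : aStep n r c (q, V, P) m =
          (q ++ [(r + m.1, c + m.2)],
           setCell V (r + m.1) (c + m.2) (getCell V r c + 1),
           setCell P (r + m.1) (c + m.2) (getCell P r c)) := by
        simp [aStep, hv, h1]
      have hbstep : bStep n r c (q, V) m =
          (q ++ [(r + m.1, c + m.2)],
           setCell V (r + m.1) (c + m.2) (getCell V r c + 1)) := by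
        simp [bStep, hv, h1]
      have hd : -1 ≤ getCell V r c := hI3 r c
      have hWV' := WFg_setCell hWV (getCell V r c + 1) hnr hnc
      have hWP' := WFg_setCell hWP (getCell P r c) hnr hnc
      have hgV' : ∀ a b : Int, inR n a → inR n b →
          getCell (setCell V (r + m.1) (c + m.2) (getCell V r c + 1)) a b =
            if idxN n.toNat a = idxN n.toNat (r + m.1) ∧ idxN n.toNat b = idxN n.toNat (c + m.2)
            then getCell V r c + 1 else getCell V a b :=
        fun a b ha hb => getCell_setCell hWV _ hnr hnc ha hb
      have hE : ExtG V (setCell V (r + m.1) (c + m.2) (getCell V r c + 1)) := by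
        intro a b hab
        by_cases hir : inR n a ∧ inR n b
        · rw [hgV' a b hir.1 hir.2]
          split_ifs with hif
          · exfalso
            exact hab (by rw [getCell_congr hWV hir.1 hir.2 hnr hnc hif.1 hif.2]; exact h1)
          · rfl
        · rw [getCell_oob hWV' (by omega) hir, getCell_oob hWV (by omega) hir]
      rw [hstep, hbstep]
      refine ⟨rfl, rfl, hWV', hWP', ?_, ?_, ?_, hE, ?_⟩
      · intro z hz
        rcases List.mem_append.1 hz with hz | hz
        · obtain ⟨hz1, hz2, hz3⟩ := hq z hz
          exact ⟨hz1, hz2, by rw [hE z.1 z.2 hz3]; exact hz3⟩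
        · rw [List.mem_singleton] at hz
          subst hz
          refine ⟨hnr, hnc, ?_⟩
          rw [hgV' _ _ hnr hnc, if_pos ⟨rfl, rfl⟩]
          omega
      · intro a b hab
        by_cases hir : inR n a ∧ inR n b
        · rw [hgV' a b hir.1 hir.2] at hab
          rw [getCell_setCell hWP _ hnr hnc hir.1 hir.2]
          split_ifs at hab ⊢ with hif
          · omega
          · exact hI2 a b hab
        · rw [getCell_oob hWV' (by omega) hir] at hab; omega
      · intro a b
        by_cases hir : inR n a ∧ inR n b
        · rw [hgV' a b hir.1 hir.2]
          split_ifs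
          · omega
          · exact hI3 a b
        · rw [getCell_oob hWV' (by omega) hir]; omega
      · rw [hgV' r c hr hc, if_neg (fun h => hal ⟨h.1.symm, h.2.symm⟩)]
    · -- not newly discovered
      have hbstep : bStep n r c (q, V) m = (q, V) := by
        simp [bStep, h1]
      by_cases h2 : getCell V (r + m.1) (c + m.2) = getCell V r c + 1
      · -- accumulate
        have hstep : aStep n r c (q, V, P) m =
            (q, V, setCell P (r + m.1) (c + m.2)
              (getCell P (r + m.1) (c + m.2) + getCell P r c)) := by
          have hne : ¬ (getCell V r c + 1 = -1) := by have := hI3 r c; omega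
          simp [aStep, hv, h2, hne]
        rw [hstep, hbstep]
        refine ⟨rfl, rfl, hWV, WFg_setCell hWP _ hnr hnc, hq, ?_, hI3, ExtG_refl V, rfl⟩
        intro a b hab
        by_cases hir : inR n a ∧ inR n b
        · rw [getCell_setCell hWP _ hnr hnc hir.1 hir.2]
          split_ifs with hif
          · exfalso
            have := getCell_congr hWV hir.1 hir.2 hnr hnc hif.1 hif.2
            rw [this, h2] at hab
            have := hI3 r c
            omega
          · exact hI2 a b hab
        · rw [getCell_oob hWV (by omega) hir] at hab; omega
      · -- skip
        have hstep : aStep n r c (q, V, P) m = (q, V, P) := by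
          simp [aStep, h1, h2]
        rw [hstep, hbstep]
        exact ⟨rfl, rfl, hWV, hWP, hq, hI2, hI3, ExtG_refl V, rfl⟩
  · have hstep : aStep n r c (q, V, P) m = (q, V, P) := by simp [aStep, hv]
    have hbstep : bStep n r c (q, V) m = (q, V) := by simp [bStep, hv]
    rw [hstep, hbstep]
    exact ⟨rfl, rfl, hWV, hWP, hq, hI2, hI3, ExtG_refl V, rfl⟩

-- invariant preservation along the whole inner fold of A (and the B correspondence)
lemma aFold_pres {n r c : Int} (hn : 1 ≤ n) (ms : List (Int × Int))
    (hms : ∀ m ∈ ms, m ∈ knightMoves) :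
    ∀ (q : List (Int × Int)) (V P : List (List Int)),
    inR n r → inR n c → getCell V r c ≠ -1 →
    WFg n V → WFg n P → QInv n q V → PInv V P → VInv V →
    (ms.foldl (aStep n r c) (q, V, P)).1 = (ms.foldl (bStep n r c) (q, V)).1 ∧
    (ms.foldl (aStep n r c) (q, V, P)).2.1 = (ms.foldl (bStep n r c) (q, V)).2 ∧
    WFg n (ms.foldl (aStep n r c) (q, V, P)).2.1 ∧
    WFg n (ms.foldl (aStep n r c) (q, V, P)).2.2 ∧
    QInv n (ms.foldl (aStep n r c) (q, V, P)).1 (ms.foldl (aStep n r c) (q, V, P)).2.1 ∧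
    PInv (ms.foldl (aStep n r c) (q, V, P)).2.1 (ms.foldl (aStep n r c) (q, V, P)).2.2 ∧
    VInv (ms.foldl (aStep n r c) (q, V, P)).2.1 ∧
    ExtG V (ms.foldl (aStep n r c) (q, V, P)).2.1 ∧
    getCell (ms.foldl (aStep n r c) (q, V, P)).2.1 r c = getCell V r c := by
  induction ms with
  | nil =>
    intro q V P hr hc hy hWV hWP hq hI2 hI3
    exact ⟨rfl, rfl, hWV, hWP, hq, hI2, hI3, ExtG_refl V, rfl⟩
  | cons m ms ih =>
    intro q V P hr hc hy hWV hWP hq hI2 hI3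
    have hm := hms m List.mem_cons_self
    obtain ⟨e1, e2, w1, w2, qi, pi, vi, ex, gy⟩ :=
      aStep_pres hn hm hr hc hy hWV hWP hq hI2 hI3
    simp only [List.foldl_cons]
    have hsplit : aStep n r c (q, V, P) m =
        ((aStep n r c (q, V, P) m).1,
         (aStep n r c (q, V, P) m).2.1, (aStep n r c (q, V, P) m).2.2) := rfl
    have hbsplit : bStep n r c (q, V) m =
        ((aStep n r c (q, V, P) m).1, (aStep n r c (q, V, P) m).2.1) := by
      rw [Prod.ext_iff]; exact ⟨e1.symm, e2.symm⟩
    rw [hsplit, hbsplit]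
    obtain ⟨f1, f2, g1, g2, g3, g4, g5, g6, g7⟩ :=
      ih (fun m' hm' => hms m' (List.mem_cons_of_mem m hm')) _ _ _ hr hc (by rw [gy]; exact hy)
        w1 w2 qi pi vi
    exact ⟨f1, f2, g1, g2, g3, g4, g5, ExtG_trans ex g6, by rw [g7, gy]⟩

-- bStep-only preservation (used for the pending queue of the discovery pass)
lemma bFold_pres {n r c : Int} (hn : 1 ≤ n) (ms : List (Int × Int))
    (hms : ∀ m ∈ ms, m ∈ knightMoves) :
    ∀ (q : List (Int × Int)) (V : List (List Int)),
    inR n r → inR n c → getCell V r c ≠ -1 →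
    WFg n V → QInv n q V → VInv V →
    WFg n (ms.foldl (bStep n r c) (q, V)).2 ∧
    QInv n (ms.foldl (bStep n r c) (q, V)).1 (ms.foldl (bStep n r c) (q, V)).2 ∧
    VInv (ms.foldl (bStep n r c) (q, V)).2 ∧
    ExtG V (ms.foldl (bStep n r c) (q, V)).2 := by
  intro q V hr hc hy hWV hq hI3
  have hP0 : PInv V (mkGrid n 0) := by
    intro a b _
    by_cases hir : inR n a ∧ inR n b
    · exact getCell_mkGrid 0 hir.1 hir.2
    · exact getCell_oob (WFg_mkGrid n 0) (by omega) hir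
  obtain ⟨e1, e2, w1, _, qi, _, vi, ex, _⟩ :=
    aFold_pres hn ms hms q V (mkGrid n 0) hr hc hy hWV (WFg_mkGrid n 0) hq hP0 hI3
  refine ⟨by rw [← e2]; exact w1, ?_, by rw [← e2]; exact vi, by rw [← e2]; exact ex⟩
  rw [← e1, ← e2]
  exact qi

-- bPass1R keeps the distance grid well-formed and only extends it
lemma bPass1R_ext {n : Int} (hn : 1 ≤ n) : ∀ (f : Nat) (q : List (Int × Int)) (V : List (List Int)),
    WFg n V → QInv n q V → VInv V →
    WFg n (bPass1R n f q V).2 ∧ ExtG V (bPass1R n f q V).2 := by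
  intro f
  induction f with
  | zero => intro q V hWV _ _; exact ⟨hWV, ExtG_refl V⟩
  | succ f ih =>
    intro q V hWV hq hI3
    cases q with
    | nil => exact ⟨hWV, ExtG_refl V⟩
    | cons y td =>
      obtain ⟨hy1, hy2, hy3⟩ := hq y List.mem_cons_self
      have htd : QInv n td V := fun z hz => hq z (List.mem_cons_of_mem y hz)
      obtain ⟨w, qi, vi, ex⟩ :=
        bFold_pres hn knightMoves (fun m hm => hm) td V hy1 hy2 hy3 hWV htd hI3
      have := ih (knightMoves.foldl (bStep n y.1 y.2) (td, V)).1
        (knightMoves.foldl (bStep n y.1 y.2) (td, V)).2 w qi vi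
      simp only [bPass1R]
      exact ⟨this.1, ExtG_trans ex this.2⟩

-- ExtG from a state to the final grid of the discovery pass that continues from it
lemma ext_to_final {n r c : Int} (hn : 1 ≤ n) (ms : List (Int × Int))
    (hms : ∀ m ∈ ms, m ∈ knightMoves) (f : Nat) (q : List (Int × Int)) (V : List (List Int))
    (hr : inR n r) (hc : inR n c) (hy : getCell V r c ≠ -1)
    (hWV : WFg n V) (hq : QInv n q V) (hI3 : VInv V) :
    ExtG V (bPass1R n f (ms.foldl (bStep n r c) (q, V)).1 (ms.foldl (bStep n r c) (q, V)).2).2 := by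
  obtain ⟨w, qi, vi, ex⟩ := bFold_pres hn ms hms q V hr hc hy hWV hq hI3
  exact ExtG_trans ex (bPass1R_ext hn f _ _ w qi vi).2

-- the crux: A's inner fold updates the path grid exactly as B's replay step does
-- against the final distance grid Vf
lemma crux {n r c : Int} (hn : 1 ≤ n) (ms : List (Int × Int)) :
    (∀ m ∈ ms, m ∈ knightMoves) →
    ∀ (f : Nat) (q : List (Int × Int)) (V P Vf : List (List Int)),
    WFg n V → WFg n P →
    inR n r → inR n c → getCell V r c ≠ -1 →
    PInv V P → VInv V → QInv n q V →
    Vf = (bPass1R n f (ms.foldl (bStep n r c) (q, V)).1 (ms.foldl (bStep n r c) (q, V)).2).2 →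
    (ms.foldl (aStep n r c) (q, V, P)).2.2 = ms.foldl (b2Step n Vf r c) P := by
  induction ms with
  | nil => intro _ f q V P Vf _ _ _ _ _ _ _ _ _; rfl
  | cons m ms ih =>
    intro hms f q V P Vf hWV hWP hr hc hy hI2 hI3 hq hVf
    have hm := hms m List.mem_cons_self
    have hms' : ∀ m' ∈ ms, m' ∈ knightMoves := fun m' hm' => hms m' (List.mem_cons_of_mem m hm')
    simp only [List.foldl_cons] at hVf ⊢
    by_cases hv : isValid (r + m.1) (c + m.2) n
    · have hnr : inR n (r + m.1) := ⟨by omega, hv.2.1⟩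
      have hnc : inR n (c + m.2) := ⟨by omega, hv.2.2.2⟩
      have hal := no_alias hm hr hc hv.1 hv.2.1 hv.2.2.1 hv.2.2.2
      have hps := aStep_pres hn hm hr hc hy hWV hWP hq hI2 hI3
      by_cases h1 : getCell V (r + m.1) (c + m.2) = -1
      · -- discovery: B's replay step adds into a still-zero cell, same as A's assignment
        have ha : aStep n r c (q, V, P) m =
            (q ++ [(r + m.1, c + m.2)],
             setCell V (r + m.1) (c + m.2) (getCell V r c + 1),
             setCell P (r + m.1) (c + m.2) (getCell P r c)) := by
          simp [aStep, hv, h1]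
        have hb : bStep n r c (q, V) m =
            (q ++ [(r + m.1, c + m.2)],
             setCell V (r + m.1) (c + m.2) (getCell V r c + 1)) := by
          simp [bStep, hv, h1]
        rw [ha] at hps
        obtain ⟨_, _, w1, w2, qi, pi, vi, ex, gy⟩ := hps
        rw [hb] at hVf
        have hE1 : ExtG (setCell V (r + m.1) (c + m.2) (getCell V r c + 1)) Vf := by
          rw [hVf]
          exact ext_to_final hn ms hms' f _ _ hr hc (by rw [gy]; exact hy) w1 qi vi
        have hg1 : getCell (setCell V (r + m.1) (c + m.2) (getCell V r c + 1))
            (r + m.1) (c + m.2) = getCell V r c + 1 := by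
          rw [getCell_setCell hWV _ hnr hnc hnr hnc, if_pos ⟨rfl, rfl⟩]
        have hfr : getCell Vf r c = getCell V r c := by
          rw [hE1 r c (by rw [gy]; exact hy), gy]
        have hfx : getCell Vf (r + m.1) (c + m.2) = getCell V r c + 1 := by
          rw [hE1 (r + m.1) (c + m.2) (by rw [hg1]; have := hI3 r c; omega), hg1]
        have hb2 : b2Step n Vf r c P m = setCell P (r + m.1) (c + m.2) (getCell P r c) := by
          simp [b2Step, hv, hfx, hfr, hI2 _ _ h1]
        rw [ha, hb2]
        exact ih hms' f _ _ _ _ w1 w2 hr hc (by rw [gy]; exact hy) pi vi qi hVf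
      · have hb : bStep n r c (q, V) m = (q, V) := by simp [bStep, h1]
        rw [hb] at hVf
        have hE0 : ExtG V Vf := by
          rw [hVf]; exact ext_to_final hn ms hms' f _ _ hr hc hy hWV hq hI3
        have hfr : getCell Vf r c = getCell V r c := hE0 r c hy
        have hfx : getCell Vf (r + m.1) (c + m.2) = getCell V (r + m.1) (c + m.2) :=
          hE0 (r + m.1) (c + m.2) h1
        by_cases h2 : getCell V (r + m.1) (c + m.2) = getCell V r c + 1
        · -- already one level deeper: both accumulate
          have ha : aStep n r c (q, V, P) m =
              (q, V, setCell P (r + m.1) (c + m.2)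
                (getCell P (r + m.1) (c + m.2) + getCell P r c)) := by
            have hne : ¬ (getCell V r c + 1 = -1) := by have := hI3 r c; omega
            simp [aStep, hv, h2, hne]
          rw [ha] at hps
          obtain ⟨_, _, _, w2, _, pi, _, _, _⟩ := hps
          have hb2 : b2Step n Vf r c P m = setCell P (r + m.1) (c + m.2)
              (getCell P (r + m.1) (c + m.2) + getCell P r c) := by
            simp [b2Step, hv, hfx, hfr, h2]
          rw [ha, hb2]
          exact ih hms' f _ _ _ _ hWV w2 hr hc hy pi hI3 hq hVf
        · -- different level: both skip
          have ha : aStep n r c (q, V, P) m = (q, V, P) := by simp [aStep, h1, h2]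
          have hb2 : b2Step n Vf r c P m = P := by
            simp [b2Step, hfx, hfr, h2]
          rw [ha, hb2]
          exact ih hms' f _ _ _ _ hWV hWP hr hc hy hI2 hI3 hq hVf
    · have ha : aStep n r c (q, V, P) m = (q, V, P) := by simp [aStep, hv]
      have hb : bStep n r c (q, V) m = (q, V) := by simp [bStep, hv]
      have hb2 : b2Step n Vf r c P m = P := by simp [b2Step, hv]
      rw [hb] at hVf
      rw [ha, hb2]
      exact ih hms' f _ _ _ _ hWV hWP hr hc hy hI2 hI3 hq hVf

-- the main simulation: A's combined loop equals B's discovery pass followed by the replay pass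
lemma main_sim {n : Int} (hn : 1 ≤ n) :
    ∀ (f : Nat) (q : List (Int × Int)) (V P : List (List Int)),
    WFg n V → WFg n P → QInv n q V → PInv V P → VInv V →
    aLoopR n f q V P = ((bPass1R n f q V).2, bPass2 n (bPass1R n f q V).2 (bPass1R n f q V).1 P) := by
  intro f
  induction f with
  | zero => intro q V P _ _ _ _ _; simp [aLoopR, bPass1R, bPass2]
  | succ f ih =>
    intro q V P hWV hWP hq hI2 hI3
    cases q with
    | nil => simp [aLoopR, bPass1R, bPass2]
    | cons y td =>
      obtain ⟨hy1, hy2, hy3⟩ := hq y List.mem_cons_self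
      have htd : QInv n td V := fun z hz => hq z (List.mem_cons_of_mem y hz)
      obtain ⟨e1, e2, w1, w2, qi, pi, vi, _, _⟩ :=
        aFold_pres hn knightMoves (fun m hm => hm) td V P hy1 hy2 hy3 hWV hWP htd hI2 hI3
      have hcx := crux hn knightMoves (fun m hm => hm) f td V P
        (bPass1R n f (knightMoves.foldl (bStep n y.1 y.2) (td, V)).1
          (knightMoves.foldl (bStep n y.1 y.2) (td, V)).2).2
        hWV hWP hy1 hy2 hy3 hI2 hI3 htd rfl
      have hih := ih (knightMoves.foldl (aStep n y.1 y.2) (td, V, P)).1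
        (knightMoves.foldl (aStep n y.1 y.2) (td, V, P)).2.1
        (knightMoves.foldl (aStep n y.1 y.2) (td, V, P)).2.2 w1 w2 qi pi vi
      show aLoopR n f _ _ _ = _
      rw [hih]
      simp only [bPass1R, bPass2, List.foldl_cons]
      rw [e1, e2, hcx]

-- ===== VERDICT (by name: the statement is the Claim_ definition above) =====
theorem num_knight_paths_spec : Claim_equal_num_knight_paths := by
  intro n start end_ _ hpre
  obtain ⟨hn, hs1a, hs1b, hs2a, hs2b, he1a, he1b, he2a, he2b⟩ := hpre
  have hs1 : inR n start.1 := ⟨hs1a, hs1b⟩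
  have hs2 : inR n start.2 := ⟨hs2a, hs2b⟩
  have he1 : inR n end_.1 := ⟨he1a, he1b⟩
  have he2 : inR n end_.2 := ⟨he2a, he2b⟩
  have hWm1 := WFg_mkGrid n (-1)
  have hWm0 := WFg_mkGrid n 0
  have hWV0 := WFg_setCell hWm1 0 hs1 hs2
  have hWP0 := WFg_setCell hWm0 1 hs1 hs2
  have hgV0 : ∀ a b : Int, inR n a → inR n b →
      getCell (setCell (mkGrid n (-1)) start.1 start.2 0) a b =
        if idxN n.toNat a = idxN n.toNat start.1 ∧ idxN n.toNat b = idxN n.toNat start.2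
        then 0 else -1 := by
    intro a b ha hb
    rw [getCell_setCell hWm1 0 hs1 hs2 ha hb]
    split_ifs
    · rfl
    · exact getCell_mkGrid (-1) ha hb
  have hq0 : QInv n [(start.1, start.2)] (setCell (mkGrid n (-1)) start.1 start.2 0) := by
    intro y hy
    rw [List.mem_singleton] at hy
    subst hy
    refine ⟨hs1, hs2, ?_⟩
    rw [hgV0 _ _ hs1 hs2, if_pos ⟨rfl, rfl⟩]
    omega
  have hI20 : PInv (setCell (mkGrid n (-1)) start.1 start.2 0)
      (setCell (mkGrid n 0) start.1 start.2 1) := by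
    intro a b hab
    by_cases hir : inR n a ∧ inR n b
    · rw [hgV0 a b hir.1 hir.2] at hab
      rw [getCell_setCell hWm0 1 hs1 hs2 hir.1 hir.2]
      split_ifs at hab ⊢ with hif
      · exact getCell_mkGrid 0 hir.1 hir.2
    · rw [getCell_oob hWV0 (by omega) hir] at hab; omega
  have hI30 : VInv (setCell (mkGrid n (-1)) start.1 start.2 0) := by
    intro a b
    by_cases hir : inR n a ∧ inR n b
    · rw [hgV0 a b hir.1 hir.2]; split_ifs <;> omega
    · rw [getCell_oob hWV0 (by omega) hir]; omega
  have hsim := main_sim hn (n.toNat * n.toNat + 1) [(start.1, start.2)]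
    (setCell (mkGrid n (-1)) start.1 start.2 0) (setCell (mkGrid n 0) start.1 start.2 1)
    hWV0 hWP0 hq0 hI20 hI30
  show _ = num_knight_paths_alt n start end_
  simp only [num_knight_paths, num_knight_paths_alt]
  rw [aLoop_eq, bPass1_eq, hsim]
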